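-- pv_equiv track=rewrite | github.com/ma-da/seedsoftruth | rag_cleaner.py | canonicalize_persons
-- ===== SOURCE A (Python) =====
-- def canonicalize_persons(persons):
--
--     canonical = {}
--
--     for p in persons:
--         parts = p.split()
--
--         last = parts[-1]
--
--         # prefer longest name
--         if last not in canonical or len(p) > len(canonical[last]):
--             canonical[last] = p
--
--     return sorted(canonical.values())
-- ===== SOURCE B (Python) =====
-- def canonicalize_persons(persons):
--     # group-by decomposition: collect each last name's group, then reduce each
--     # group with max(key=len) (first-longest), finally sort the representatives
--     groups = {}
--     for p in persons:
--         groups.setdefault(p.split()[-1], []).append(p)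
--     return sorted(max(g, key=len) for g in groups.values())
-- ===== Notes on version B (the rewrite author's own statement) =====
-- stated objective: alternative
-- what changed: Replaced A's single pass that threads a dict of running per-last-name bests by a group-by decomposition: one pass collects every last name's whole group with setdefault(...).append, then each group is reduced with max(key=len) and the representatives sorted.
-- outside the precondition, e.g. on canonicalize_persons(['John Smith', '  ']): A raises IndexError, B raises IndexError
import Mathlib
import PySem

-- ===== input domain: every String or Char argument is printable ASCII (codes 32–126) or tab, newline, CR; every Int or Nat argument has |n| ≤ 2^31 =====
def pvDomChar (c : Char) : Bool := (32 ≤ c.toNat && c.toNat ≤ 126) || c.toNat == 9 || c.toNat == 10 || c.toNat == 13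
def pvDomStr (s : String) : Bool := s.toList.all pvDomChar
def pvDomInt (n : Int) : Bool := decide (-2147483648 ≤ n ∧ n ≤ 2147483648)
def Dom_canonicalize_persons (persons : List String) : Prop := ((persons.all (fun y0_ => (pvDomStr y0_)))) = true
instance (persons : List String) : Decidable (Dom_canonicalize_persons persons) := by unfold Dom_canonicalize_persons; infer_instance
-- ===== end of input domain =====

-- B replaces A's one-pass dict of running per-last-name bests by a group-by
-- decomposition: collect each last name's whole group, then reduce each group
-- with max(key=len); objective: alternative (same cost, different structure).

-- shared helper: p.split()[-1]. On whitespace-only p Python raises IndexError (pyGet?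
-- returns none); such inputs are excluded by Pre_, so the "" default is never reached there.
def pvLast (p : String) : String :=
  (PySem.List.pyGet? (PySem.Str.split₀ p) (-1)).getD ""

-- ===== PORT A =====
-- loop body of A's 'for p in persons' (the branch order and the strict '>' are A's)
def pvStepA (d : PySem.Dict String String) (p : String) : PySem.Dict String String :=
  match d.get? (pvLast p) with
  | none => d.insert (pvLast p) p                          -- 'last not in canonical'
  | some cur =>                                            -- 'len(p) > len(canonical[last])'
      if PySem.Str.len cur < PySem.Str.len p then d.insert (pvLast p) p else d

def canonicalize_persons (persons : List String) : List String :=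
  let canonical := persons.foldl pvStepA PySem.Dict.empty
  PySem.List.sorted canonical.values (fun x => x) false

-- ===== PORT B =====
-- loop body of B's 'for p in persons': groups.setdefault(p.split()[-1], []).append(p)
def pvStepB (d : PySem.Dict String (List String)) (p : String) :
    PySem.Dict String (List String) :=
  d.insert (pvLast p) ((d.get? (pvLast p)).getD [] ++ [p])

-- max(g, key=len); a group is never empty, so the "" default of getD is never reached
def canonicalize_persons_alt (persons : List String) : List String :=
  let groups := persons.foldl pvStepB PySem.Dict.empty
  let chosen := groups.values.map (fun g => (PySem.List.max? g PySem.Str.len).getD "")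
  PySem.List.sorted chosen (fun x => x) false

-- ===== PRECONDITION & SPEC =====
-- Pre_ excludes inputs containing a whitespace-only (or empty) string, on which both
-- Pythons raise IndexError at parts[-1].
def Pre_canonicalize_persons (persons : List String) : Prop :=
  ∀ p ∈ persons, PySem.Str.split₀ p ≠ []

instance (persons : List String) : Decidable (Pre_canonicalize_persons persons) := by
  unfold Pre_canonicalize_persons; infer_instance

def pvWitness_canonicalize_persons : List String :=
  ["John Smith", "Jonathan Smith", "A Lee"]

def Spec_canonicalize_persons (persons : List String) (out : List String) : Prop :=
  out = canonicalize_persons_alt persons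

instance (persons : List String) (out : List String) : Decidable (Spec_canonicalize_persons persons out) := by
  unfold Spec_canonicalize_persons; infer_instance

-- ===== CLAIM (what is proved, stated in full; the proofs are below) =====
def Claim_equal_canonicalize_persons : Prop :=
  ∀ (persons : List String), Dom_canonicalize_persons persons →
    Pre_canonicalize_persons persons →
      Spec_canonicalize_persons persons (canonicalize_persons persons)

-- ===== LEMMAS AND PROOFS =====

-- proof-side abbreviation: the first-longest member of persons with last name `last`
def pvBest (xs : List String) (last : String) : Option String :=
  PySem.List.max? (xs.filter (fun q => pvLast q == last)) PySem.Str.len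

-- the Set fold of B is Set.ofList of the mapped list
lemma pvSet_fold_eq (xs : List String) :
    xs.foldl (fun s p => PySem.Set.add s (pvLast p)) PySem.Set.empty
      = PySem.Set.ofList (xs.map pvLast) := by
  rw [PySem.Set.ofList, ← List.foldl_map]

lemma pvBest_eq_none_iff (xs : List String) (l : String) :
    pvBest xs l = none ↔ l ∉ xs.map pvLast := by
  rw [pvBest, PySem.List.max?_eq_none_iff, List.filter_eq_nil_iff]
  simp

lemma pvFind?_map_pair {ν : Type} (g : String → ν) (S : List String) (l0 : String) :
    List.find? (fun p => p.1 == l0) (S.map (fun l => (l, g l)))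
      = if l0 ∈ S then some (l0, g l0) else none := by
  induction S with
  | nil => simp
  | cons a S ih =>
      by_cases h : a = l0
      · subst h; simp
      · have hb : (a == l0) = false := by simpa using h
        have hm : (l0 ∈ a :: S) ↔ l0 ∈ S := by
          simp only [List.mem_cons, or_iff_right_iff_imp]
          exact fun he => absurd he.symm h
        simp [hb, ih, hm]

lemma pvBest_append_ne (xs : List String) (p l : String)
    (h : (pvLast p == l) = false) :
    pvBest (xs ++ [p]) l = pvBest xs l := by
  unfold pvBest
  rw [List.filter_append]
  simp [h]

lemma pvBest_append_none (xs : List String) (p l : String)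
    (h : (pvLast p == l) = true) (h2 : pvBest xs l = none) :
    pvBest (xs ++ [p]) l = some p := by
  unfold pvBest PySem.List.max? at h2 ⊢
  rw [List.filter_append, List.foldl_append, h2]
  simp only [List.filter_cons, h, if_true, List.filter_nil, List.foldl_cons, List.foldl_nil]

lemma pvBest_append_some (xs : List String) (p l m : String)
    (h : (pvLast p == l) = true) (h2 : pvBest xs l = some m) :
    pvBest (xs ++ [p]) l
      = if PySem.Str.len m < PySem.Str.len p then some p else some m := by
  unfold pvBest PySem.List.max? at h2 ⊢
  rw [List.filter_append, List.foldl_append, h2]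
  simp only [List.filter_cons, h, if_true, List.filter_nil, List.foldl_cons, List.foldl_nil]

-- the loop invariant: A's dict after any prefix is the group-by table of that prefix
lemma pvInvariant (xs : List String) :
    (xs.foldl pvStepA PySem.Dict.empty).items
      = (xs.foldl (fun s p => PySem.Set.add s (pvLast p)) PySem.Set.empty).map
          (fun l => (l, (pvBest xs l).getD "")) := by
  induction xs using List.reverseRecOn with
  | nil => rfl
  | append_singleton xs p ih =>
    rw [List.foldl_append, List.foldl_append]
    simp only [List.foldl_cons, List.foldl_nil]
    set S := xs.foldl (fun s p => PySem.Set.add s (pvLast p)) PySem.Set.empty with hS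
    set D := xs.foldl pvStepA PySem.Dict.empty with hD
    have hmemS : ∀ l, l ∈ S ↔ l ∈ xs.map pvLast := by
      intro l; rw [hS, pvSet_fold_eq]; exact PySem.Set.mem_ofList _ _
    have hget : ∀ l, D.get? l
        = if l ∈ S then some ((pvBest xs l).getD "") else none := by
      intro l
      simp only [PySem.Dict.get?, ih, pvFind?_map_pair]
      split <;> rfl
    by_cases hmem : pvLast p ∈ S
    · -- last name already seen
      have hadd : PySem.Set.add S (pvLast p) = S := by
        simp [PySem.Set.add, PySem.Set.contains, hmem]
      obtain ⟨m, hm⟩ : ∃ m, pvBest xs (pvLast p) = some m := by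
        cases hb : pvBest xs (pvLast p) with
        | none => exact absurd ((hmemS _).mp hmem) ((pvBest_eq_none_iff xs (pvLast p)).mp hb)
        | some m => exact ⟨m, rfl⟩
      have hcont : D.contains (pvLast p) = true := by
        simp only [PySem.Dict.contains, ih, List.any_map]
        exact List.any_eq_true.mpr ⟨pvLast p, hmem, by simp⟩
      have hstep : pvStepA D p
          = if PySem.Str.len m < PySem.Str.len p then D.insert (pvLast p) p else D := by
        unfold pvStepA
        rw [hget, if_pos hmem, hm]
        rfl
      rw [hstep, hadd]
      by_cases hlen : PySem.Str.len m < PySem.Str.len p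
      · rw [if_pos hlen]
        have hins : (D.insert (pvLast p) p).items
            = D.items.map (fun q => if q.1 == pvLast p then (pvLast p, p) else q) := by
          simp [PySem.Dict.insert, hcont]
        rw [hins, ih, List.map_map]
        refine List.map_congr_left (fun l hl => ?_)
        by_cases hlp : l = pvLast p
        · subst hlp
          simp only [Function.comp_apply, beq_self_eq_true, if_true]
          rw [pvBest_append_some xs p _ m (by simp) hm, if_pos hlen]
          rfl
        · have hne : (pvLast p == l) = false := by simpa using fun e => hlp e.symm
          have hne' : (l == pvLast p) = false := by simpa using hlp
          simp only [Function.comp_apply, hne', Bool.false_eq_true, if_false]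
          rw [pvBest_append_ne xs p l hne]
      · rw [if_neg hlen, ih]
        refine List.map_congr_left (fun l hl => ?_)
        by_cases hlp : l = pvLast p
        · subst hlp
          rw [pvBest_append_some xs p _ m (by simp) hm, if_neg hlen, hm]
        · have hne : (pvLast p == l) = false := by simpa using fun e => hlp e.symm
          rw [pvBest_append_ne xs p l hne]
    · -- new last name
      have hadd : PySem.Set.add S (pvLast p) = S ++ [pvLast p] := by
        simp only [PySem.Set.add, PySem.Set.contains]
        rw [if_neg (by simpa using hmem)]
      have hbest : pvBest xs (pvLast p) = none :=
        (pvBest_eq_none_iff xs (pvLast p)).mpr (fun h => hmem ((hmemS _).mpr h))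
      have hcont : D.contains (pvLast p) = false := by
        simp only [PySem.Dict.contains, ih, List.any_map]
        simp only [List.any_eq_false]
        intro q hq
        simp only [Function.comp_apply]
        intro e
        rw [eq_of_beq e] at hq
        exact hmem hq
      have hstep : pvStepA D p = D.insert (pvLast p) p := by
        unfold pvStepA
        rw [hget, if_neg hmem]
      have hins : (D.insert (pvLast p) p).items = D.items ++ [(pvLast p, p)] := by
        simp [PySem.Dict.insert, hcont]
      rw [hstep, hadd, hins, ih, List.map_append]
      congr 1
      · refine List.map_congr_left (fun l hl => ?_)
        have hne : (pvLast p == l) = false := by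
          simp only [beq_eq_false_iff_ne, ne_eq]
          intro e
          exact hmem (by rw [e]; exact hl)
        rw [pvBest_append_ne xs p l hne]
      · simp only [List.map_cons, List.map_nil]
        rw [pvBest_append_none xs p (pvLast p) (by simp) hbest]
        rfl

-- B's dict after any prefix holds, per last name, the whole group of that prefix
lemma pvInvariantB (xs : List String) :
    (xs.foldl pvStepB PySem.Dict.empty).items
      = (xs.foldl (fun s p => PySem.Set.add s (pvLast p)) PySem.Set.empty).map
          (fun l => (l, xs.filter (fun q => pvLast q == l))) := by
  induction xs using List.reverseRecOn with
  | nil => rfl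
  | append_singleton xs p ih =>
    rw [List.foldl_append, List.foldl_append]
    simp only [List.foldl_cons, List.foldl_nil]
    set S := xs.foldl (fun s p => PySem.Set.add s (pvLast p)) PySem.Set.empty with hS
    set D := xs.foldl pvStepB PySem.Dict.empty with hD
    have hmemS : ∀ l, l ∈ S ↔ l ∈ xs.map pvLast := by
      intro l; rw [hS, pvSet_fold_eq]; exact PySem.Set.mem_ofList _ _
    have hget : ∀ l, D.get? l
        = if l ∈ S then some (xs.filter (fun q => pvLast q == l)) else none := by
      intro l
      simp only [PySem.Dict.get?, ih, pvFind?_map_pair]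
      split <;> rfl
    have hfilter : ∀ l, (pvLast p == l) = false →
        (xs ++ [p]).filter (fun q => pvLast q == l) = xs.filter (fun q => pvLast q == l) := by
      intro l h
      rw [List.filter_append]
      simp [h]
    have hfilter' : (xs ++ [p]).filter (fun q => pvLast q == pvLast p)
        = xs.filter (fun q => pvLast q == pvLast p) ++ [p] := by
      rw [List.filter_append]
      simp
    by_cases hmem : pvLast p ∈ S
    · have hadd : PySem.Set.add S (pvLast p) = S := by
        simp [PySem.Set.add, PySem.Set.contains, hmem]
      have hcont : D.contains (pvLast p) = true := by
        simp only [PySem.Dict.contains, ih, List.any_map]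
        exact List.any_eq_true.mpr ⟨pvLast p, hmem, by simp⟩
      have hstep : pvStepB D p
          = D.insert (pvLast p) (xs.filter (fun q => pvLast q == pvLast p) ++ [p]) := by
        unfold pvStepB
        rw [hget, if_pos hmem]
        rfl
      have hins : (D.insert (pvLast p) (xs.filter (fun q => pvLast q == pvLast p) ++ [p])).items
          = D.items.map (fun q =>
              if q.1 == pvLast p then (pvLast p, xs.filter (fun q => pvLast q == pvLast p) ++ [p]) else q) := by
        simp [PySem.Dict.insert, hcont]
      rw [hstep, hadd, hins, ih, List.map_map]
      refine List.map_congr_left (fun l hl => ?_)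
      by_cases hlp : l = pvLast p
      · subst hlp
        simp only [Function.comp_apply, beq_self_eq_true, if_true]
        rw [hfilter']
      · have hne : (pvLast p == l) = false := by
          simp only [beq_eq_false_iff_ne, ne_eq]
          exact fun e => hlp e.symm
        have hne' : (l == pvLast p) = false := by simpa using hlp
        simp only [Function.comp_apply, hne', Bool.false_eq_true, if_false]
        rw [hfilter l hne]
    · have hadd : PySem.Set.add S (pvLast p) = S ++ [pvLast p] := by
        simp only [PySem.Set.add, PySem.Set.contains]
        rw [if_neg (by simpa using hmem)]
      have hcont : D.contains (pvLast p) = false := by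
        simp only [PySem.Dict.contains, ih, List.any_map]
        simp only [List.any_eq_false]
        intro q hq
        simp only [Function.comp_apply]
        intro e
        rw [eq_of_beq e] at hq
        exact hmem hq
      have hnil : xs.filter (fun q => pvLast q == pvLast p) = [] := by
        rw [List.filter_eq_nil_iff]
        intro q hq h
        exact hmem ((hmemS _).mpr (by rw [← eq_of_beq h]; exact List.mem_map_of_mem hq))
      have hstep : pvStepB D p = D.insert (pvLast p) [p] := by
        unfold pvStepB
        rw [hget, if_neg hmem]
        rfl
      have hins : (D.insert (pvLast p) [p]).items = D.items ++ [(pvLast p, [p])] := by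
        simp [PySem.Dict.insert, hcont]
      rw [hstep, hadd, hins, ih, List.map_append]
      congr 1
      · refine List.map_congr_left (fun l hl => ?_)
        have hne : (pvLast p == l) = false := by
          simp only [beq_eq_false_iff_ne, ne_eq]
          intro e
          exact hmem (by rw [e]; exact hl)
        rw [hfilter l hne]
      · simp only [List.map_cons, List.map_nil]
        rw [hfilter', hnil]
        rfl

-- ===== VERDICT (by name: the statement is the Claim_ definition above) =====
theorem canonicalize_persons_spec : Claim_equal_canonicalize_persons := by
  intro persons _ _
  show _ = _
  unfold canonicalize_persons canonicalize_persons_alt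
  have hA := pvInvariant persons
  have hB := pvInvariantB persons
  simp only [PySem.Dict.values, hA, hB, List.map_map]
  rfl
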